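-- pv_equiv track=rewrite | github.com/purpletint/advent-of-code-2021 | day7_2.py | calc_for_one
-- ===== SOURCE A (Python) =====
-- def calc_for_one(element, i):
--     difference = abs(element-i)
--     if difference == 0:
--         return 0
--     else:
--         sum_num = 0
--         for i in range(1, difference + 1):
--             sum_num += i
--         # sum_num = sum([x for x in range(1, difference+1)])
--         return sum_num
-- ===== SOURCE B (Python) =====
-- def calc_for_one(element, i):
--     # Closed form: sum 1..d pairs up as d/2 pairs each summing to d+1 (Gauss pairing).
--     if element > i:
--         d = element - i
--     else:
--         d = i - element
--     if d % 2 == 0: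
--         return (d // 2) * (d + 1)
--     else:
--         return d * ((d + 1) // 2)
-- ===== Notes on version B (the rewrite author's own statement) =====
-- stated objective: faster
-- what changed: Replaced the O(d) summation loop with the O(1) Gauss-pairing closed form: compute d by conditional subtraction (no abs), then split on parity and return (d//2)*(d+1) or d*((d+1)//2), both exact integer products with no loop.
import Mathlib
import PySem

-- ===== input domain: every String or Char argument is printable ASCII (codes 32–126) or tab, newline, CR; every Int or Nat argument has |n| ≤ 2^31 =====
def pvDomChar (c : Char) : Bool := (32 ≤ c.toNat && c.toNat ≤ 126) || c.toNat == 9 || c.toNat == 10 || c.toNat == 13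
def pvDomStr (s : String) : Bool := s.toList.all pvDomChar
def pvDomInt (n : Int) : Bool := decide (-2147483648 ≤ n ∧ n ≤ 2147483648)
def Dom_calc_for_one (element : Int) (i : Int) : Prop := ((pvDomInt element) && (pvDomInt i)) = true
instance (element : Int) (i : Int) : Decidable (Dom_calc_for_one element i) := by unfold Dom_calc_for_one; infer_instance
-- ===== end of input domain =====

-- B replaces A's O(d) summation loop with the O(1) parity-split Gauss-pairing closed form.


-- ===== PORT A =====
def calc_for_one (element : Int) (i : Int) : Int :=
  let difference : Int := |element - i|
  if difference == 0 then 0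
  else
    (PySem.List.pyRange 1 (difference + 1) 1).foldl (fun sum_num i => sum_num + i) 0

-- ===== PORT B =====
def calc_for_one_alt (element : Int) (i : Int) : Int :=
  let d : Int := if element > i then element - i else i - element
  if PySem.Int.mod d 2 == 0 then
    (PySem.Int.floordiv d 2) * (d + 1)
  else
    d * (PySem.Int.floordiv (d + 1) 2)

-- ===== PRECONDITION & SPEC =====
def Spec_calc_for_one (element : Int) (i : Int) (out : Int) : Prop := out = calc_for_one_alt element i
instance (element : Int) (i : Int) (out : Int) : Decidable (Spec_calc_for_one element i out) := by unfold Spec_calc_for_one; infer_instance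

-- ===== CLAIM (what is proved, stated in full; the proofs are below) =====
def Claim_equal_calc_for_one : Prop := ∀ (element : Int) (i : Int), Dom_calc_for_one element i → Spec_calc_for_one element i (calc_for_one element i)

-- ===== LEMMAS AND PROOFS =====
theorem pv_sum_range (n : Nat) :
    (PySem.List.pyRange 1 ((n : Int) + 1) 1).foldl (fun sum_num i => sum_num + i) 0 * 2
      = (n : Int) * ((n : Int) + 1) := by
  induction n with
  | zero => simp [PySem.List.pyRange_one_eq_nil]
  | succ m ih =>
    have h : (1 : Int) ≤ (m : Int) + 1 := by omega
    have : ((m + 1 : Nat) : Int) + 1 = ((m : Int) + 1) + 1 := by push_cast; ring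
    rw [this, PySem.List.pyRange_one_succ_right h, List.foldl_append]
    simp only [List.foldl]
    push_cast
    nlinarith [ih]

theorem calc_for_one_spec : Claim_equal_calc_for_one := by
  intro element i _
  unfold Spec_calc_for_one calc_for_one calc_for_one_alt
  set dd : Int := |element - i| with hdd
  have hd0 : 0 ≤ dd := abs_nonneg _
  have hdeq : (if element > i then element - i else i - element) = dd := by
    rw [hdd]; split_ifs with h <;> [rw [abs_of_pos (by omega)]; rw [abs_of_nonpos (by omega)]] <;> ring
  simp only [hdeq]
  obtain ⟨n, hn⟩ : ∃ n : Nat, dd = (n : Int) := ⟨dd.toNat, by omega⟩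
  have hmod : PySem.Int.mod dd 2 = dd % 2 := PySem.Int.mod_eq_emod_of_pos (by omega)
  have hfd : PySem.Int.floordiv dd 2 = dd / 2 := PySem.Int.floordiv_eq_ediv_of_pos (by omega)
  have hfd1 : PySem.Int.floordiv (dd + 1) 2 = (dd + 1) / 2 := PySem.Int.floordiv_eq_ediv_of_pos (by omega)
  have hsum := pv_sum_range n
  rw [← hn] at hsum
  by_cases h : dd == 0
  · have h0 : dd = 0 := by simpa using h
    simp [h, h0]
  · simp only [h, Bool.false_eq_true, if_neg, not_false_iff, hmod, hfd, hfd1]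
    by_cases hp : dd % 2 = 0
    · obtain ⟨k, hk⟩ : ∃ k : Int, dd = 2 * k := ⟨dd / 2, by omega⟩
      have hk2 : dd / 2 = k := by omega
      simp only [hp, beq_self_eq_true, if_pos, hk2]
      nlinarith [hsum]
    · have hne : ¬ (dd % 2 == 0) = true := by simpa using hp
      obtain ⟨k, hk⟩ : ∃ k : Int, dd + 1 = 2 * k := ⟨(dd + 1) / 2, by omega⟩
      have hk2 : (dd + 1) / 2 = k := by omega
      simp only [hne, if_neg, Bool.false_eq_true, not_false_iff, hk2]
      nlinarith [hsum]

-- ===== VERDICT (by name: the statement is the Claim_ definition above) =====
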